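-- pv_equiv track=rewrite | github.com/ELVISJVV/IPC1_Practica3_202006666 | Practica3.py | rellenar_matriz
-- ===== SOURCE A (Python) =====
-- def rellenar_matriz(m, n, list):
--     for i in range(0, m):
--         for j in range(0, n):
--             if i == 0 or i == m-1:
--                 list[i][j] = ('-')
--             elif j == 0 or j == n-1:
--                 list[i][j] = ('|')
--             else:
--                 list[i][j] = (' ')
--         # tableros[i][j]=5
--     return list
-- ===== SOURCE B (Python) =====
-- def rellenar_matriz(m, n, list):
--     # Frame painter via precomputed row templates: one row-level splice per row
--     # instead of A's per-cell nested branching.  Mutates `list` in place like A.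
--     if m <= 0 or n <= 0:
--         return list
--     border = ['-'] * n
--     middle = ['|'] + [' '] * (n - 2) + ['|'] if n > 1 else ['|']
--     for i in range(m):
--         src = border if i == 0 or i == m - 1 else middle
--         list[i][:n] = src
--     return list
-- ===== Notes on version B (the rewrite author's own statement) =====
-- stated objective: simpler
-- what changed: B precomputes two row templates ('-'*n border and '|'+' '*(n-2)+'|' middle) and splices one per row in a single row loop, instead of A's nested per-cell loop with a three-way branch at every cell.
import Mathlib
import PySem

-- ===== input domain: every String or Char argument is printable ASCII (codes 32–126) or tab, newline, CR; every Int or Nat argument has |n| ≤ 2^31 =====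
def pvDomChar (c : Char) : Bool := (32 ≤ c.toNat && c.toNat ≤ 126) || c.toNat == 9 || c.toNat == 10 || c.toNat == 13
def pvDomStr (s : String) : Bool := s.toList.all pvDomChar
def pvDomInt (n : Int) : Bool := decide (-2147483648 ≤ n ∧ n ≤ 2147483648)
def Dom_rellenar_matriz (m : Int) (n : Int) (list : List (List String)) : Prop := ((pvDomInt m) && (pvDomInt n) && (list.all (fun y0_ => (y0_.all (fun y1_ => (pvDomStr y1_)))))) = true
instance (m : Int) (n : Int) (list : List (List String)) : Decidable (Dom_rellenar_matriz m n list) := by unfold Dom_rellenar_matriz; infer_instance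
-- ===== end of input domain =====

-- B repaints the frame from two precomputed row templates ('border', 'middle') spliced
-- in with one row-level assignment per row, instead of A's per-cell nested branching;
-- objective: simpler.  A mutates `list` in place; B performs the same mutation, and the
-- equivalence proved here is about the return value.

-- ===== PORT A =====
-- `list[i][j] = v` : in-place cell update; Python raises out of range, which Pre_ excludes,
-- so the out-of-range case of List.modify is never reached on admitted inputs.
def rellenar_matriz (m : Int) (n : Int) (list : List (List String)) : List (List String) :=
  (PySem.List.pyRange 0 m 1).foldl (fun acc i =>
    (PySem.List.pyRange 0 n 1).foldl (fun acc2 j =>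
      acc2.modify i.toNat (fun row => row.set j.toNat
        (if i == 0 || i == m - 1 then "-"
         else if j == 0 || j == n - 1 then "|"
         else " "))) acc) list

-- ===== PORT B =====
-- `list[i][:n] = src` : Python slice assignment, exact for 0 ≤ n: the row becomes
-- src ++ row[n:].
def rellenar_matriz_alt (m : Int) (n : Int) (list : List (List String)) : List (List String) :=
  if m ≤ 0 ∨ n ≤ 0 then list
  else
    let border : List String := List.replicate n.toNat "-"
    let middle : List String :=
      if n > 1 then "|" :: (List.replicate (n - 2).toNat " " ++ ["|"]) else ["|"]
    (PySem.List.pyRange 0 m 1).foldl (fun acc i =>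
      let src := if i == 0 || i == m - 1 then border else middle
      acc.modify i.toNat (fun row => src ++ row.drop n.toNat)) list

-- ===== PRECONDITION & SPEC =====
-- Pre_ excludes exactly the inputs where A raises IndexError: n > 0 together with
-- m exceeding the number of rows, or some of the first m rows shorter than n.
def Pre_rellenar_matriz (m : Int) (n : Int) (list : List (List String)) : Prop :=
  0 < n → (m ≤ (list.length : Int) ∧ ∀ row ∈ list.take m.toNat, n ≤ (row.length : Int))
instance (m : Int) (n : Int) (list : List (List String)) : Decidable (Pre_rellenar_matriz m n list) := by unfold Pre_rellenar_matriz; infer_instance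
def pvWitness_rellenar_matriz : Int × Int × List (List String) :=
  (3, 3, [["x","x","x"], ["x","x","x"], ["x","x","x"]])
def Spec_rellenar_matriz (m : Int) (n : Int) (list : List (List String)) (out : List (List String)) : Prop := out = rellenar_matriz_alt m n list
instance (m : Int) (n : Int) (list : List (List String)) (out : List (List String)) : Decidable (Spec_rellenar_matriz m n list out) := by unfold Spec_rellenar_matriz; infer_instance

-- ===== CLAIM (what is proved, stated in full; the proofs are below) =====
def Claim_equal_rellenar_matriz : Prop := ∀ (m : Int) (n : Int) (list : List (List String)), Dom_rellenar_matriz m n list → Pre_rellenar_matriz m n list → Spec_rellenar_matriz m n list (rellenar_matriz m n list)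

-- ===== LEMMAS AND PROOFS =====

theorem pvMapIdx_id {α : Type} (xs : List α) : xs.mapIdx (fun _ x => x) = xs := by
  apply List.ext_getElem?; intro i; simp [List.getElem?_mapIdx]

theorem pvFoldl_id {α β : Type} (l : List β) (acc : α) :
    l.foldl (fun a _ => a) acc = acc := by
  induction l generalizing acc with
  | nil => rfl
  | cons x l ih => simpa using ih acc

theorem pvModify_id {α : Type} (l : List α) (i : Nat) :
    l.modify i (fun x => x) = l := by
  apply List.ext_getElem?; intro j
  simp [List.getElem?_modify]

theorem pvModify_modify {α : Type} (l : List α) (i : Nat) (f g : α → α) :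
    (l.modify i f).modify i g = l.modify i (fun x => g (f x)) := by
  apply List.ext_getElem?; intro j
  simp [List.getElem?_modify]
  cases l[j]? <;> simp <;> (try split) <;> rfl

-- a loop repeatedly editing the same slot i edits it once with the composed function
theorem pvFoldl_modify_fix {α β : Type} (i : Nat) (g : β → α → α) (l : List β) (acc : List α) :
    l.foldl (fun a j => a.modify i (g j)) acc
      = acc.modify i (fun x => l.foldl (fun x j => g j x) x) := by
  induction l generalizing acc with
  | nil => simp [pvModify_id]
  | cons b l ih =>
      simp only [List.foldl_cons]
      rw [ih, pvModify_modify]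

-- `for j in range(K): x[j] = f(j, x[j])` is a mapIdx over the original list (Nat form)
theorem pvFoldl_range_modify_nat {α : Type} (K : Nat) (f : Nat → α → α) (xs : List α) :
    (List.range K).foldl (fun acc j => acc.modify j (f j)) xs
      = xs.mapIdx (fun j x => if j < K then f j x else x) := by
  induction K with
  | zero => simp [pvMapIdx_id]
  | succ K ih =>
      rw [List.range_succ, List.foldl_append, ih]
      simp only [List.foldl_cons, List.foldl_nil]
      apply List.ext_getElem?; intro j
      simp only [List.getElem?_modify, List.getElem?_mapIdx]
      cases xs[j]? with
      | none => simp
      | some x =>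
          simp only [Option.map_some]
          by_cases hK : K = j
          · subst hK; simp
          · simp only [Option.map_some, if_neg hK]
            congr 1
            split_ifs <;> first | rfl | omega

-- the same statement for a Python `range(0, k)` over Int
theorem pvFoldl_range_modify {α : Type} (k : Int) (f : Int → α → α) (xs : List α) :
    (PySem.List.pyRange 0 k 1).foldl (fun acc j => acc.modify j.toNat (f j)) xs
      = xs.mapIdx (fun j x => if (j : Int) < k then f j x else x) := by
  rw [PySem.List.pyRange_one, List.foldl_map]
  simp only [zero_add, Int.toNat_natCast, Int.sub_zero]
  rw [pvFoldl_range_modify_nat k.toNat (fun t => f (t : Int)) xs]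
  simp only [Int.lt_toNat]

-- overwriting the first K cells of a row with constants is a splice
theorem pvMapIdx_const_splice {α : Type} (K : Nat) (c : Nat → α) (xs : List α)
    (h : K ≤ xs.length) :
    xs.mapIdx (fun j x => if j < K then c j else x)
      = (List.range K).map c ++ xs.drop K := by
  induction xs generalizing K c with
  | nil =>
      have : K = 0 := by simpa using h
      subst this; simp [pvMapIdx_id]
  | cons x xs ih =>
      cases K with
      | zero => simp [pvMapIdx_id]
      | succ K =>
          rw [List.mapIdx_cons]
          simp only [Nat.zero_lt_succ, if_pos, List.range_succ_eq_map, List.map_cons,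
            List.map_map, List.drop_succ_cons, List.cons_append]
          congr 1
          rw [show (fun (i : Nat) (x : α) => if i + 1 < K + 1 then c (i + 1) else x)
                = (fun j (x : α) => if j < K then (fun t => c (t + 1)) j else x) from by
              funext j x; simp]
          rw [ih K (fun j => c (j + 1)) (by simpa using h)]
          rfl

-- the interior-row cell pattern written out is exactly the `middle` template
theorem pvInterior (n : Int) (hn : 0 < n) :
    (List.range n.toNat).map
        (fun (j : Nat) => if (((j : Int)) == 0 || ((j : Int)) == n - 1 : Bool) then "|" else " ")
      = (if n > 1 then "|" :: (List.replicate (n - 2).toNat " " ++ ["|"])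
         else (["|"] : List String)) := by
  by_cases h1 : n = 1
  · subst h1; norm_num
  · have h2 : 2 ≤ n := by omega
    rw [if_pos (by omega)]
    have hK : n.toNat = (n - 2).toNat + 2 := by omega
    apply List.ext_getElem
    · simp; omega
    · intro i hi hi'
      simp only [List.getElem_map, List.getElem_range]
      rcases Nat.eq_zero_or_pos i with h0 | h0
      · subst h0; simp
      · rw [List.getElem_cons, dif_neg (by omega : ¬ i = 0)]
        have hilt : i < n.toNat := by simpa using hi
        by_cases hlast : i = n.toNat - 1
        · rw [List.getElem_append_right (by simp; omega)]
          simp only [List.length_replicate]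
          rw [show ((i : Int) == 0 || (i : Int) == n - 1 : Bool) = true from by
            simp; omega]
          simp
        · rw [List.getElem_append_left (by simp; omega)]
          simp only [List.getElem_replicate]
          rw [show ((i : Int) == 0 || (i : Int) == n - 1 : Bool) = false from by
            simp; omega]
          simp

-- ===== VERDICT (by name: the statement is the Claim_ definition above) =====
theorem rellenar_matriz_spec : Claim_equal_rellenar_matriz := by
  intro m n list _ hpre
  unfold Spec_rellenar_matriz rellenar_matriz rellenar_matriz_alt
  by_cases h0 : m ≤ 0 ∨ n ≤ 0
  · rw [if_pos h0]
    rcases h0 with hm | hn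
    · rw [PySem.List.pyRange_one_eq_nil hm]
      rfl
    · rw [show PySem.List.pyRange 0 n 1 = [] from PySem.List.pyRange_one_eq_nil hn]
      simp only [List.foldl_nil]
      exact pvFoldl_id _ _
  · rw [if_neg h0]
    push_neg at h0
    obtain ⟨hm, hn⟩ := h0
    obtain ⟨hlen, hrows⟩ := hpre hn
    simp only [pvFoldl_modify_fix, List.set_eq_modify, pvFoldl_range_modify]
    apply List.ext_getElem?; intro i
    simp only [List.getElem?_mapIdx]
    cases hcell : list[i]? with
    | none => rfl
    | some row =>
        simp only [Option.map_some, Option.some.injEq]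
        by_cases him : (i : Int) < m
        · simp only [if_pos him]
          have hmem : row ∈ list.take m.toNat := by
            have hi : i < list.length := (List.getElem?_eq_some_iff.mp hcell).1
            have hrow : list[i] = row := (List.getElem?_eq_some_iff.mp hcell).2
            have him' : i < m.toNat := Int.lt_toNat.mpr him
            have : (list.take m.toNat)[i]'(by simp; omega) = row := by
              rw [List.getElem_take]; exact hrow
            exact this ▸ List.getElem_mem _
          have hrl : n.toNat ≤ row.length := by
            have := hrows row hmem; omega
          simp only [← Int.lt_toNat]
          rw [pvMapIdx_const_splice n.toNat _ row hrl]
          congr 1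
          cases hb : ((i : Int) == 0 || (i : Int) == m - 1 : Bool)
          · simp only [Bool.false_eq_true, if_false]
            exact pvInterior n hn
          · simp only [if_true]
            simp [List.map_const']
        · simp [if_neg him]
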